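-- pv_equiv track=rewrite | github.com/edugauravkumar-afk/resetgeoEdge | streamlit_app.py | chunked
-- ===== SOURCE A (Python) =====
-- from typing import Any, Dict, Iterable, Iterator, List, Optional, Set, Tuple, cast
--
-- def chunked(items: Iterable[Any], size: int) -> Iterator[List[Any]]:
--     """Yield successive fixed-size chunks from items."""
--     chunk: List[Any] = []
--     for item in items:
--         chunk.append(item)
--         if len(chunk) >= size:
--             yield chunk
--             chunk = []
--     if chunk:
--         yield chunk
-- ===== SOURCE B (Python) =====
-- def chunked(items, size):
--     """Yield successive fixed-size chunks from items.
--
--     Bulk-slice decomposition: materialise the items once, then repeatedly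
--     peel off a slice of `step` elements.  step = max(size, 1) keeps the
--     loop well-founded and gives chunks of one element when size <= 0,
--     exactly as the per-element version does.
--     """
--     buf = list(items)
--     step = max(size, 1)
--     while buf:
--         yield buf[:step]
--         buf = buf[step:]
-- ===== Notes on version B (the rewrite author's own statement) =====
-- stated objective: alternative
-- what changed: Replaces the per-element append-and-check generator loop by a while loop that repeatedly slices a whole chunk off the front of the list (bulk slicing instead of element-wise accumulation).
import Mathlib
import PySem

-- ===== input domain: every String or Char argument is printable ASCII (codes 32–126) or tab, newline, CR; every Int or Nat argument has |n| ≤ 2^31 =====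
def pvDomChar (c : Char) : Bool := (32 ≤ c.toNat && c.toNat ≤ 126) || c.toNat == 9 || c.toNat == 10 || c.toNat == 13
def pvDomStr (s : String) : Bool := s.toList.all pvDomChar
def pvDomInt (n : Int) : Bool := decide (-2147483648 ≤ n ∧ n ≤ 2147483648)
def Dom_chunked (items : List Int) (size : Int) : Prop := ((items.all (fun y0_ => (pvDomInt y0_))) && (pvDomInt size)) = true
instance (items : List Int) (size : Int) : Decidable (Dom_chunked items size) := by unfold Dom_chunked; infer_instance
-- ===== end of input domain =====

-- B replaces the per-element append-and-check loop by repeated bulk slicing off the front; same values.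

-- ===== PORT A =====
-- generator: accumulate `chunk` element by element, emit when len(chunk) >= size, flush the rest
def chunked (items : List Int) (size : Int) : List (List Int) :=
  let st := items.foldl
    (fun (st : List (List Int) × List Int) item =>
      let chunk := st.2 ++ [item]
      if size ≤ (chunk.length : Int) then (st.1 ++ [chunk], ([] : List Int))
      else (st.1, chunk))
    ([], [])
  if st.2 = [] then st.1 else st.1 ++ [st.2]

-- ===== PORT B =====
-- while buf: yield buf[:step]; buf = buf[step:]   (step = max(size,1) ≥ 1, carried as a Nat with its positivity proof for termination)
def chunkedAltGo (step : Nat) (hstep : 1 ≤ step) (buf : List Int) : List (List Int) :=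
  if h : buf = [] then []
  else PySem.List.slice buf none (some (step : Int)) ::
       chunkedAltGo step hstep (PySem.List.slice buf (some (step : Int)) none)
termination_by buf.length
decreasing_by
  simp only [PySem.List.slice_from_natCast, List.length_drop]
  have : buf.length ≠ 0 := by simpa [List.length_eq_zero_iff] using h
  omega

def chunked_alt (items : List Int) (size : Int) : List (List Int) :=
  chunkedAltGo (max size 1).toNat (by omega) items

-- ===== PRECONDITION & SPEC =====
def Spec_chunked (items : List Int) (size : Int) (out : List (List Int)) : Prop := out = chunked_alt items size
instance (items : List Int) (size : Int) (out : List (List Int)) : Decidable (Spec_chunked items size out) := by unfold Spec_chunked; infer_instance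

-- ===== CLAIM (what is proved, stated in full; the proofs are below) =====
def Claim_equal_chunked : Prop := ∀ (items : List Int) (size : Int), Dom_chunked items size → Spec_chunked items size (chunked items size)

-- ===== LEMMAS AND PROOFS =====

lemma chunkedAltGo_eq (step : Nat) (hstep : 1 ≤ step) (buf : List Int) :
    chunkedAltGo step hstep buf =
      if buf = [] then [] else buf.take step :: chunkedAltGo step hstep (buf.drop step) := by
  rw [chunkedAltGo]
  simp [PySem.List.slice_to_natCast, PySem.List.slice_from_natCast]

-- main loop invariant: A's fold from a partial chunk c (shorter than the step) followed by the
-- final flush produces acc ++ the bulk chunks of (c ++ l)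
lemma chunked_inv (size : Int) (hstep : 1 ≤ (max size 1).toNat) (l : List Int) :
    ∀ (c : List Int) (acc : List (List Int)), c.length < (max size 1).toNat →
      (let st := l.foldl
          (fun (st : List (List Int) × List Int) item =>
            let chunk := st.2 ++ [item]
            if size ≤ (chunk.length : Int) then (st.1 ++ [chunk], ([] : List Int))
            else (st.1, chunk))
          (acc, c)
       if st.2 = [] then st.1 else st.1 ++ [st.2]) =
      acc ++ chunkedAltGo (max size 1).toNat hstep (c ++ l) := by
  induction l with
  | nil =>
    intro c acc hc
    simp only [List.foldl_nil, List.append_nil]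
    rw [chunkedAltGo_eq]
    by_cases h : c = []
    · simp [h]
    · have htake : c.take (max size 1).toNat = c := List.take_of_length_le (by omega)
      have hdrop : c.drop (max size 1).toNat = [] := List.drop_eq_nil_of_le (by omega)
      simp [h, htake, hdrop, chunkedAltGo_eq]
  | cons a l ih =>
    intro c acc hc
    simp only [List.foldl_cons]
    by_cases hcond : size ≤ ((c ++ [a]).length : Int)
    · have hlen : (c ++ [a]).length = (max size 1).toNat := by
        simp only [List.length_append, List.length_singleton] at *
        omega
      simp only [hcond, if_pos]
      have hih := ih ([] : List Int) (acc ++ [c ++ [a]]) (by simp only [List.length_nil]; omega)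
      simp only [List.nil_append] at hih
      rw [hih]
      have hne : c ++ a :: l ≠ [] := by simp
      have hsplit : c ++ a :: l = (c ++ [a]) ++ l := by simp
      have htake : (c ++ a :: l).take (max size 1).toNat = c ++ [a] := by
        rw [hsplit, ← hlen, List.take_left]
      have hdrop : (c ++ a :: l).drop (max size 1).toNat = l := by
        rw [hsplit, ← hlen, List.drop_left]
      have hgoal : chunkedAltGo (max size 1).toNat hstep (c ++ a :: l)
          = (c ++ [a]) :: chunkedAltGo (max size 1).toNat hstep l := by
        rw [chunkedAltGo_eq]
        simp only [hne, if_neg, not_false_iff, htake, hdrop]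
      rw [hgoal]
      simp
    · have hlt : (c ++ [a]).length < (max size 1).toNat := by
        simp only [List.length_append, List.length_singleton] at *
        omega
      simp only [hcond, if_neg, not_false_iff]
      rw [ih (c ++ [a]) acc hlt]
      simp

-- ===== VERDICT (by name: the statement is the Claim_ definition above) =====
theorem chunked_spec : Claim_equal_chunked := by
  intro items size _
  unfold Spec_chunked chunked chunked_alt
  have h := chunked_inv size (by omega) items ([] : List Int) ([] : List (List Int)) (by simp only [List.length_nil]; omega)
  simpa using h
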